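-- pv_equiv track=rewrite | github.com/tiagowright/jalo | optim.py | hamming_distance_cluster_centers
-- ===== SOURCE A (Python) =====
-- def hamming_distance(char_at_pos_1: tuple[int, ...], char_at_pos_2: tuple[int, ...]) -> int:
--     '''
--     The Hamming distance between two layouts is the number of positions where the characters differ.
--     '''
--     return sum(1 for i, j in zip(char_at_pos_1, char_at_pos_2) if i != j)
--
-- def hamming_distance_cluster_centers(sorted_population: list[tuple[int, ...]], cluster_threshold: int = 10) -> list[int]:
--     '''
--     simple clustering by best score: the cluster center must be the lowest score of the cluster, and
--     all other layouts within the cluster_threshold distance are then pulled into the cluster.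
--
--     empirically, i found cluster_threshold between 10 and 12 to be an interesting point, where simple hill descent
--     seems to generate layouts within that neighborhood for a single seed, but outside the neighborhood for different
--     seeds, and that seems like a good place the set it. It means 5 to 6 swaps from the center.
--
--     i poetically like to think of it as a planet clearing it's neighborhood by it's gravity. Sorry Pluto.
--     '''
--     centers = []
--     clustered = set()
--
--     for i in range(len(sorted_population)):
--         if i in clustered:
--             continue
--
--         centers.append(i)
--
--         for j in range(i+1, len(sorted_population)):
--             if j in clustered:
--                 continue
--
--             dist = hamming_distance(sorted_population[i], sorted_population[j])
--             if dist <= cluster_threshold: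
--                 clustered.add(j)
--
--     return centers
-- ===== SOURCE B (Python) =====
-- def hamming_distance(char_at_pos_1, char_at_pos_2):
--     return sum(1 for i, j in zip(char_at_pos_1, char_at_pos_2) if i != j)
--
-- def hamming_distance_cluster_centers(sorted_population, cluster_threshold=10):
--     # pull formulation: a point becomes a center iff every earlier center is farther than the threshold
--     centers = []
--     for i, layout in enumerate(sorted_population):
--         if all(hamming_distance(sorted_population[c], layout) > cluster_threshold for c in centers):
--             centers.append(i)
--     return centers
-- ===== Notes on version B (the rewrite author's own statement) =====
-- stated objective: simpler
-- what changed: Replaced A's forward-marking 'clustered' set (each new center scans all later points and marks the close ones) by a pull formulation: iterate points in order and take a point as a new center iff its Hamming distance to every already-chosen center exceeds the threshold.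
import Mathlib
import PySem

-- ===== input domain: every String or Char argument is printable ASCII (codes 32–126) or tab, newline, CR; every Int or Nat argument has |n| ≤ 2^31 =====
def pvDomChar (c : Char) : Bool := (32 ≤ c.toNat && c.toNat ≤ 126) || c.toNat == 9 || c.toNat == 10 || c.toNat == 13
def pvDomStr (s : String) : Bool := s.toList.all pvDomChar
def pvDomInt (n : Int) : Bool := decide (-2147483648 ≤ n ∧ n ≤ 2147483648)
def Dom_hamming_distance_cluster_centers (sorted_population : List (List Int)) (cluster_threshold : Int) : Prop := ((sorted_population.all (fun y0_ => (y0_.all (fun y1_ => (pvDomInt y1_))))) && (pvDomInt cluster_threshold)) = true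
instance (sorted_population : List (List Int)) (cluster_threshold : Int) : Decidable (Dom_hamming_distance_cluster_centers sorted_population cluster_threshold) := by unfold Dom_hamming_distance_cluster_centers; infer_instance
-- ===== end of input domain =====

-- B replaces A's forward-marking `clustered` set by a direct check of each point against the
-- already-chosen centers (objective: simpler).

-- ===== PORT A =====
-- helper hamming_distance: sum(1 for i, j in zip(a, b) if i != j)
def pyHammingDistance (a b : List Int) : Int :=
  ((a.zip b).map (fun p => if p.1 ≠ p.2 then (1 : Int) else 0)).sum

-- indexing sorted_population[i] is always in range in both ports, so the total form pyGetD is exact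
def hamming_distance_cluster_centers (sorted_population : List (List Int)) (cluster_threshold : Int) : List Int :=
  ((PySem.List.pyRange 0 (sorted_population.length : Int) 1).foldl
    (fun (st : List Int × PySem.Set Int) i =>
      if PySem.Set.contains st.2 i then st
      else
        (st.1 ++ [i],
         (PySem.List.pyRange (i + 1) (sorted_population.length : Int) 1).foldl
           (fun (cl : PySem.Set Int) j =>
             if PySem.Set.contains cl j then cl
             else
               if pyHammingDistance (PySem.List.pyGetD sorted_population i [])
                    (PySem.List.pyGetD sorted_population j []) ≤ cluster_threshold then
                 PySem.Set.add cl j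
               else cl)
           st.2))
    ([], PySem.Set.empty)).1

-- ===== PORT B =====
def hamming_distance_cluster_centers_alt (sorted_population : List (List Int)) (cluster_threshold : Int) : List Int :=
  (PySem.List.enumerate sorted_population).foldl
    (fun (centers : List Int) (p : Int × List Int) =>
      if centers.all (fun c =>
           pyHammingDistance (PySem.List.pyGetD sorted_population c []) p.2 > cluster_threshold) then
        centers ++ [p.1]
      else centers)
    []

-- ===== PRECONDITION & SPEC =====
def Spec_hamming_distance_cluster_centers (sorted_population : List (List Int)) (cluster_threshold : Int) (out : List Int) : Prop := out = hamming_distance_cluster_centers_alt sorted_population cluster_threshold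
instance (sorted_population : List (List Int)) (cluster_threshold : Int) (out : List Int) : Decidable (Spec_hamming_distance_cluster_centers sorted_population cluster_threshold out) := by unfold Spec_hamming_distance_cluster_centers; infer_instance

-- ===== CLAIM (what is proved, stated in full; the proofs are below) =====
def Claim_equal_hamming_distance_cluster_centers : Prop := ∀ (sorted_population : List (List Int)) (cluster_threshold : Int), Dom_hamming_distance_cluster_centers sorted_population cluster_threshold → Spec_hamming_distance_cluster_centers sorted_population cluster_threshold (hamming_distance_cluster_centers sorted_population cluster_threshold)

-- ===== LEMMAS AND PROOFS =====

-- "point x is within the threshold of center c"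
def pvClose (pop : List (List Int)) (T c x : Int) : Prop :=
  pyHammingDistance (PySem.List.pyGetD pop c []) (PySem.List.pyGetD pop x []) ≤ T

-- the inner marking loop of A, membership-characterized
lemma pvInner_mem (pop : List (List Int)) (T i : Int) (L : List Int) :
    ∀ (cl : PySem.Set Int) (x : Int),
      (x ∈ L.foldl
           (fun (cl : PySem.Set Int) j =>
             if PySem.Set.contains cl j then cl
             else
               if pyHammingDistance (PySem.List.pyGetD pop i [])
                    (PySem.List.pyGetD pop j []) ≤ T then PySem.Set.add cl j
               else cl) cl)
      ↔ (x ∈ cl ∨ (x ∈ L ∧ pvClose pop T i x)) := by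
  induction L with
  | nil => simp
  | cons j L ih =>
    intro cl x
    simp only [List.foldl_cons]
    by_cases hj : PySem.Set.contains cl j = true
    · rw [if_pos hj]
      simp only [ih, List.mem_cons]
      constructor
      · rintro (h | h) <;> tauto
      · rintro (h | ⟨(rfl | h), hc⟩)
        · tauto
        · exact Or.inl ((PySem.Set.contains_iff _ _).mp hj)
        · tauto
    · rw [if_neg hj]
      by_cases hd : pyHammingDistance (PySem.List.pyGetD pop i [])
          (PySem.List.pyGetD pop j []) ≤ T
      · rw [if_pos hd]
        simp only [ih, PySem.Set.mem_add, List.mem_cons]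
        constructor
        · rintro ((h | rfl) | h)
          · tauto
          · exact Or.inr ⟨Or.inl rfl, hd⟩
          · tauto
        · rintro (h | ⟨(rfl | h), hc⟩) <;> tauto
      · rw [if_neg hd]
        simp only [ih, List.mem_cons]
        constructor
        · rintro (h | h) <;> tauto
        · rintro (h | ⟨(rfl | h), hc⟩)
          · tauto
          · exact absurd hc hd
          · tauto

-- the outer loop: A's (centers, clustered) state projects to B's centers fold
lemma pvOuter (pop : List (List Int)) (T : Int) (L : List Int) :
    ∀ (cs : List Int) (cl : PySem.Set Int),
      (∀ x, x ∈ cl ↔ ∃ c ∈ cs, c < x ∧ x < (pop.length : Int) ∧ pvClose pop T c x) →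
      L.Pairwise (· < ·) →
      (∀ i ∈ L, i < (pop.length : Int)) →
      (∀ c ∈ cs, ∀ i ∈ L, c < i) →
      (L.foldl
        (fun (st : List Int × PySem.Set Int) i =>
          if PySem.Set.contains st.2 i then st
          else
            (st.1 ++ [i],
             (PySem.List.pyRange (i + 1) (pop.length : Int) 1).foldl
               (fun (cl : PySem.Set Int) j =>
                 if PySem.Set.contains cl j then cl
                 else
                   if pyHammingDistance (PySem.List.pyGetD pop i [])
                        (PySem.List.pyGetD pop j []) ≤ T then
                     PySem.Set.add cl j
                   else cl)
               st.2))
        (cs, cl)).1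
      = L.foldl
          (fun (centers : List Int) i =>
            if centers.all (fun c =>
                 pyHammingDistance (PySem.List.pyGetD pop c []) (PySem.List.pyGetD pop i []) > T) then
              centers ++ [i]
            else centers)
          cs := by
  induction L with
  | nil => intro cs cl _ _ _ _; rfl
  | cons i L ih =>
    intro cs cl hinv hpw hbnd hord
    have hpw' := (List.pairwise_cons.mp hpw).2
    have hlt : ∀ i' ∈ L, i < i' := (List.pairwise_cons.mp hpw).1
    have hbnd' : ∀ i' ∈ L, i' < (pop.length : Int) := fun i' h => hbnd i' (List.mem_cons_of_mem _ h)
    have hin : i < (pop.length : Int) := hbnd i (List.mem_cons_self ..)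
    simp only [List.foldl_cons]
    by_cases hc : PySem.Set.contains cl i = true
    · -- i is already clustered: some earlier center is close
      obtain ⟨c, hcs, _, _, hclose⟩ := (hinv i).mp ((PySem.Set.contains_iff _ _).mp hc)
      have hall : cs.all (fun c =>
          decide (pyHammingDistance (PySem.List.pyGetD pop c []) (PySem.List.pyGetD pop i []) > T)) = false := by
        simp only [List.all_eq_false, decide_eq_true_eq]
        exact ⟨c, hcs, not_lt.mpr hclose⟩
      rw [if_pos hc]
      simp only [hall, Bool.false_eq_true, if_false]
      exact ih cs cl hinv hpw' hbnd'
        (fun c hcmem i' hi' => hord c hcmem i' (List.mem_cons_of_mem _ hi'))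
    · -- i becomes a center
      have hall : cs.all (fun c =>
          decide (pyHammingDistance (PySem.List.pyGetD pop c []) (PySem.List.pyGetD pop i []) > T)) = true := by
        simp only [List.all_eq_true, decide_eq_true_eq]
        intro c hcs
        by_contra h
        exact hc ((PySem.Set.contains_iff _ _).mpr ((hinv i).mpr
          ⟨c, hcs, hord c hcs i (List.mem_cons_self ..), hin, le_of_not_gt h⟩))
      rw [if_neg hc]
      simp only [hall, if_true]
      refine ih (cs ++ [i]) _ ?_ hpw' hbnd' ?_
      · intro x
        rw [pvInner_mem]
        simp only [hinv, PySem.List.mem_pyRange_one, List.mem_append, List.mem_singleton]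
        constructor
        · rintro (⟨c, hcs, h1, h2, h3⟩ | ⟨⟨h1, h2⟩, h3⟩)
          · exact ⟨c, Or.inl hcs, h1, h2, h3⟩
          · exact ⟨i, Or.inr rfl, by omega, h2, h3⟩
        · rintro ⟨c, (hcs | rfl), h1, h2, h3⟩
          · exact Or.inl ⟨c, hcs, h1, h2, h3⟩
          · exact Or.inr ⟨⟨by omega, h2⟩, h3⟩
      · intro c hcmem i' hi'
        rcases List.mem_append.mp hcmem with h | h
        · exact hord c h i' (List.mem_cons_of_mem _ hi')
        · rw [List.mem_singleton.mp h]; exact hlt i' hi'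

-- ===== VERDICT (by name: the statement is the Claim_ definition above) =====
theorem hamming_distance_cluster_centers_spec : Claim_equal_hamming_distance_cluster_centers := by
  intro pop T _
  unfold Spec_hamming_distance_cluster_centers
  unfold hamming_distance_cluster_centers hamming_distance_cluster_centers_alt
  rw [PySem.List.enumerate_eq_map_pyRange pop ([] : List Int), List.foldl_map]
  simp only [PySem.List.len_eq]
  rw [pvOuter pop T _ [] PySem.Set.empty
      (by simp [PySem.Set.empty])
      (PySem.List.pairwise_lt_pyRange_one ..)
      (fun i h => (PySem.List.mem_pyRange_one.mp h).2)
      (by simp)]
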